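-- pv_equiv track=rewrite | github.com/settlersxp/HTMLtoPDFVisualComparisson | script.py | extract_list_of_files_to_analyze
-- ===== SOURCE A (Python) =====
-- def extract_list_of_files_to_analyze(files):
--     files_to_analyze = []
--     for file in files:
--         if file.endswith(".html"):
--             file_name = file.split(".")[0]
--             # this condition excludes the files that do not have a pair
--             if file_name + ".pdf" in files:
--                 files_to_analyze.append(file_name)
--     return files_to_analyze
-- ===== SOURCE B (Python) =====
-- def extract_list_of_files_to_analyze(files):
--     # group files by basename: html positions and whether a matching pdf exists
--     groups = {}
--     for i, f in enumerate(files):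
--         if f.endswith(".html"):
--             groups.setdefault(f.split(".")[0], [False, []])[1].append(i)
--         elif f.endswith(".pdf"):
--             groups.setdefault(f[:-4], [False, []])[0] = True
--     # scatter the matched stems back into their original positions
--     slots = [None] * len(files)
--     for stem, (has_pdf, positions) in groups.items():
--         if has_pdf:
--             for i in positions:
--                 slots[i] = stem
--     return [s for s in slots if s is not None]
-- ===== Notes on version B (the rewrite author's own statement) =====
-- stated objective: alternative
-- what changed: B replaces A's filter-with-membership-test by a group-by join: one enumerate pass groups files by basename recording html positions and a pdf flag, then matched stems are scattered into a positional slot array and the non-empty slots are collected; no membership test against the file list remains.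
import Mathlib
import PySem

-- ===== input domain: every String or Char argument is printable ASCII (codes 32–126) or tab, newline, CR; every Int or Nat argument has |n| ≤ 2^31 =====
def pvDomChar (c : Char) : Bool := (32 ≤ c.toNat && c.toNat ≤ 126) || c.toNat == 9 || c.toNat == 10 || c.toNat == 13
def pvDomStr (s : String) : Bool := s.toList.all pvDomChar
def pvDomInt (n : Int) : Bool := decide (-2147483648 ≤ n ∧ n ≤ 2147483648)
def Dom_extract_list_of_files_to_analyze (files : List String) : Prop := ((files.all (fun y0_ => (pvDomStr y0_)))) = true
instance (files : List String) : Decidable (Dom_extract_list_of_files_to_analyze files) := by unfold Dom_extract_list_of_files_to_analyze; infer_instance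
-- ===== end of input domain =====

-- B replaces A's per-html-file membership test against the whole list by a group-by join:
-- one enumerate pass groups files by basename (html positions + a pdf flag), matched stems
-- are scattered into a positional slot array, and the non-empty slots are collected
-- (objective: alternative).

-- ===== PORT A =====
def extract_list_of_files_to_analyze (files : List String) : List String :=
  files.foldl (fun files_to_analyze file =>
    if PySem.Str.endswith file ".html" then
      let file_name := ((PySem.Str.split? file ".").getD []).headD ""
      if files.contains (file_name ++ ".pdf") then files_to_analyze ++ [file_name]
      else files_to_analyze
    else files_to_analyze) []

-- ===== PORT B =====
-- B-side helpers: the elementary Python expressions Source B applies to a file name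
def pvHtml (f : String) : Bool := PySem.Str.endswith f ".html"    -- f.endswith(".html")
def pvPdf (f : String) : Bool := PySem.Str.endswith f ".pdf"      -- f.endswith(".pdf")
def pvStem (f : String) : String := ((PySem.Str.split? f ".").getD []).headD ""   -- f.split(".")[0]
def pvStrip (f : String) : String := PySem.Str.slice f none (some (-4))           -- f[:-4]

-- Source B's grouping-loop body: 'groups.setdefault(key, [False, []])' followed by an in-place
-- mutation of the entry is exactly Dict.modify with default (false, []) (d[k] = f(d.get(k, dflt)))
def pv_groupStep (d : PySem.Dict String (Bool × List Nat)) (p : String × Nat) :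
    PySem.Dict String (Bool × List Nat) :=
  if pvHtml p.1 then
    d.modify (pvStem p.1) (false, []) (fun g => (g.1, g.2 ++ [p.2]))
  else if pvPdf p.1 then
    d.modify (pvStrip p.1) (false, []) (fun g => (true, g.2))
  else d
-- Source B's scatter-loop body: 'if has_pdf: for i in positions: slots[i] = stem'
def pv_scatterStep (sl : List (Option String)) (kv : String × (Bool × List Nat)) :
    List (Option String) :=
  if kv.2.1 then kv.2.2.foldl (fun sl2 i => sl2.set i (some kv.1)) sl else sl
def extract_list_of_files_to_analyze_alt (files : List String) : List String :=
  let groups := (files.zipIdx).foldl pv_groupStep PySem.Dict.empty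
  let slots := groups.items.foldl pv_scatterStep (List.replicate files.length none)
  slots.filterMap id    -- '[s for s in slots if s is not None]'

-- ===== PRECONDITION & SPEC =====
def Spec_extract_list_of_files_to_analyze (files : List String) (out : List String) : Prop := out = extract_list_of_files_to_analyze_alt files
instance (files : List String) (out : List String) : Decidable (Spec_extract_list_of_files_to_analyze files out) := by unfold Spec_extract_list_of_files_to_analyze; infer_instance

-- ===== CLAIM (what is proved, stated in full; the proofs are below) =====
def Claim_equal_extract_list_of_files_to_analyze : Prop := ∀ (files : List String), Dom_extract_list_of_files_to_analyze files → Spec_extract_list_of_files_to_analyze files (extract_list_of_files_to_analyze files)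

-- ===== LEMMAS AND PROOFS =====

-- 'if p: (if q: out.append(g(x)))' as a filterMap
lemma foldl_if_if {α β : Type} (p q : α → Bool) (g : α → β) (l : List α) (acc : List β) :
    l.foldl (fun a x => if p x then (if q x then a ++ [g x] else a) else a) acc
      = acc ++ l.filterMap (fun x => if p x && q x then some (g x) else none) := by
  induction l generalizing acc with
  | nil => simp
  | cons x l ih =>
    cases hp : p x <;> cases hq : q x <;>
      simp [List.foldl_cons, hp, hq, ih]

lemma html_pdf_disjoint (f : String) : pvHtml f = true → pvPdf f = false := by
  intro h
  unfold pvHtml at h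
  unfold pvPdf
  by_contra hp
  simp only [Bool.not_eq_false] at hp
  rw [PySem.Str.endswith_eq, PySem.Chars.endswith_iff] at h hp
  obtain ⟨t1, h1⟩ := h
  obtain ⟨t2, h2⟩ := hp
  have e1 : f.toList.getLast? = some 'l' := by
    rw [← h1, List.getLast?_append, show (".html".toList.getLast?) = some 'l' from rfl,
        Option.some_or]
  have e2 : f.toList.getLast? = some 'f' := by
    rw [← h2, List.getLast?_append, show (".pdf".toList.getLast?) = some 'f' from rfl,
        Option.some_or]
  rw [e1] at e2
  simp at e2

lemma getD_groupFold (l : List (String × Nat)) (d : PySem.Dict String (Bool × List Nat)) (s : String) :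
    (l.foldl pv_groupStep d).getD s (false, []) =
      ((d.getD s (false, [])).1 || l.any (fun p => !pvHtml p.1 && pvPdf p.1 && (pvStrip p.1 == s)),
       (d.getD s (false, [])).2 ++ (l.filter (fun p => pvHtml p.1 && (pvStem p.1 == s))).map (fun p => p.2)) := by
  induction l generalizing d with
  | nil => simp
  | cons p l ih =>
    rw [List.foldl_cons, ih, List.any_cons, List.filter_cons]
    unfold pv_groupStep
    by_cases hh : pvHtml p.1 = true
    · have hpdf := html_pdf_disjoint p.1 hh
      rw [if_pos hh, PySem.Dict.getD_modify]
      by_cases hs : s = pvStem p.1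
      · rw [if_pos hs]; subst hs; simp [hh, hpdf]
      · rw [if_neg hs]
        have hb : (pvStem p.1 == s) = false := beq_eq_false_iff_ne.mpr (fun h => hs h.symm)
        simp [hh, hpdf, hb]
    · rw [if_neg hh]
      have hh0 : pvHtml p.1 = false := by simpa using hh
      by_cases hp : pvPdf p.1 = true
      · rw [if_pos hp, PySem.Dict.getD_modify]
        by_cases hs : s = pvStrip p.1
        · rw [if_pos hs]; subst hs; simp [hh0, hp]
        · rw [if_neg hs]
          have hb : (pvStrip p.1 == s) = false := beq_eq_false_iff_ne.mpr (fun h => hs h.symm)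
          simp [hh0, hp, hb]
      · rw [if_neg hp]
        have hp0 : pvPdf p.1 = false := by simpa using hp
        simp [hh0, hp0]

lemma nodup_keys_groupFold (l : List (String × Nat)) (d : PySem.Dict String (Bool × List Nat))
    (h : d.keys.Nodup) : (l.foldl pv_groupStep d).keys.Nodup := by
  induction l generalizing d with
  | nil => exact h
  | cons p l ih =>
    rw [List.foldl_cons]
    apply ih
    unfold pv_groupStep
    split_ifs with h1 h2
    · rw [PySem.Dict.keys_modify]; exact PySem.Dict.nodup_keys_insert _ _ _ h
    · rw [PySem.Dict.keys_modify]; exact PySem.Dict.nodup_keys_insert _ _ _ h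
    · exact h

lemma scatter_inner_length (ps : List Nat) (v : Option String) (sl : List (Option String)) :
    (ps.foldl (fun sl2 i => sl2.set i v) sl).length = sl.length := by
  induction ps generalizing sl with
  | nil => rfl
  | cons i ps ih => rw [List.foldl_cons, ih, List.length_set]

lemma scatter_inner_not_mem (ps : List Nat) (v : Option String) (sl : List (Option String))
    (j : Nat) (h : j ∉ ps) : (ps.foldl (fun sl2 i => sl2.set i v) sl)[j]? = sl[j]? := by
  induction ps generalizing sl with
  | nil => rfl
  | cons i ps ih =>
    rw [List.foldl_cons, ih _ (fun hm => h (List.mem_cons_of_mem _ hm)),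
        List.getElem?_set, if_neg (fun (he : i = j) => h (he ▸ List.mem_cons_self))]

lemma scatter_inner_mem (ps : List Nat) (v : Option String) (sl : List (Option String))
    (j : Nat) (h : j ∈ ps) (hj : j < sl.length) :
    (ps.foldl (fun sl2 i => sl2.set i v) sl)[j]? = some v := by
  induction ps generalizing sl with
  | nil => exact absurd h (List.not_mem_nil)
  | cons i ps ih =>
    rw [List.foldl_cons]
    by_cases hm : j ∈ ps
    · exact ih _ hm (by rw [List.length_set]; exact hj)
    · have hij : i = j := by
        rcases List.mem_cons.mp h with h1 | h2
        · exact h1.symm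
        · exact absurd h2 hm
      rw [scatter_inner_not_mem _ _ _ _ hm, List.getElem?_set, if_pos hij, if_pos (hij ▸ hj)]

lemma scatter_length (items : List (String × (Bool × List Nat))) (sl : List (Option String)) :
    (items.foldl pv_scatterStep sl).length = sl.length := by
  induction items generalizing sl with
  | nil => rfl
  | cons kv items ih =>
    rw [List.foldl_cons, ih]
    unfold pv_scatterStep
    split_ifs
    · exact scatter_inner_length _ _ _
    · rfl

lemma scatter_no_match (items : List (String × (Bool × List Nat))) (sl : List (Option String))
    (j : Nat) (h : ∀ kv ∈ items, ¬(kv.2.1 = true ∧ j ∈ kv.2.2)) :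
    (items.foldl pv_scatterStep sl)[j]? = sl[j]? := by
  induction items generalizing sl with
  | nil => rfl
  | cons kv items ih =>
    rw [List.foldl_cons, ih _ (fun kv' hm => h kv' (List.mem_cons_of_mem _ hm))]
    unfold pv_scatterStep
    split_ifs with hb
    · exact scatter_inner_not_mem _ _ _ _
        (fun hm => h kv List.mem_cons_self ⟨hb, hm⟩)
    · rfl

lemma any_zipIdx (files : List String) (g : String → Bool) (k : Nat) :
    (files.zipIdx k).any (fun p => g p.1) = files.any g := by
  induction files generalizing k with
  | nil => rfl
  | cons f files ih => rw [List.zipIdx_cons, List.any_cons, List.any_cons, ih]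

def pvHasPdf (files : List String) (s : String) : Bool :=
  (files.zipIdx).any (fun p => !pvHtml p.1 && pvPdf p.1 && (pvStrip p.1 == s))
def pvPos (files : List String) (s : String) : List Nat :=
  ((files.zipIdx).filter (fun p => pvHtml p.1 && (pvStem p.1 == s))).map (fun p => p.2)

lemma mem_pvPos (files : List String) (s : String) (j : Nat) :
    j ∈ pvPos files s ↔ ∃ f, files[j]? = some f ∧ pvHtml f = true ∧ pvStem f = s := by
  unfold pvPos
  simp only [List.mem_map, List.mem_filter, Bool.and_eq_true, beq_iff_eq]
  constructor
  · rintro ⟨p, ⟨hmem, hhtml, hstem⟩, hj⟩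
    exact ⟨p.1, by rw [← hj]; exact List.mem_zipIdx_iff_getElem?.mp hmem, hhtml, hstem⟩
  · rintro ⟨f, hget, hhtml, hstem⟩
    exact ⟨(f, j), ⟨List.mem_zipIdx_iff_getElem?.mpr hget, hhtml, hstem⟩, rfl⟩

lemma pdf_strip_iff (f name : String) :
    (pvPdf f = true ∧ pvStrip f = name) ↔ f = name ++ ".pdf" := by
  unfold pvPdf pvStrip
  constructor
  · rintro ⟨he, hs⟩
    simp only [PySem.Str.endswith_eq, PySem.Chars.endswith] at he
    rw [List.isSuffixOf_iff_suffix] at he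
    obtain ⟨t, ht⟩ := he
    have hsl : (PySem.Str.slice f none (some (-4))).toList = name.toList := by rw [hs]
    rw [PySem.Str.toList_slice, PySem.Chars.slice_eq_listSlice,
        PySem.List.slice_to_neg_ofNat _ 4 (by omega)] at hsl
    have hlen : f.toList.length = t.length + 4 := by rw [← ht]; simp
    have : name.toList = t := by
      rw [← hsl, hlen, ← ht]; simp
    apply String.ext
    rw [String.toList_append, ← ht, this]
  · rintro rfl
    constructor
    · simp only [PySem.Str.endswith_eq, PySem.Chars.endswith, String.toList_append]
      rw [List.isSuffixOf_iff_suffix]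
      exact ⟨name.toList, rfl⟩
    · apply String.ext
      rw [PySem.Str.toList_slice, PySem.Chars.slice_eq_listSlice,
          PySem.List.slice_to_neg_ofNat _ 4 (by omega), String.toList_append]
      simp

lemma pdf_html_disjoint (f : String) : pvPdf f = true → pvHtml f = false := by
  intro h
  by_cases hh : pvHtml f = true
  · rw [html_pdf_disjoint f hh] at h; exact absurd h (by simp)
  · simpa using hh

lemma contains_eq_hasPdf (files : List String) (s : String) :
    files.contains (s ++ ".pdf") = pvHasPdf files s := by
  unfold pvHasPdf
  rw [any_zipIdx files (fun f => !pvHtml f && pvPdf f && (pvStrip f == s)) 0]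
  rw [Bool.eq_iff_iff]
  simp only [List.contains_iff_mem, List.any_eq_true, Bool.and_eq_true, Bool.not_eq_true',
    beq_iff_eq]
  constructor
  · intro h
    have hpair := (pdf_strip_iff (s ++ ".pdf") s).mpr rfl
    exact ⟨s ++ ".pdf", h, ⟨pdf_html_disjoint _ hpair.1, hpair.1⟩, hpair.2⟩
  · rintro ⟨f, hf, ⟨_, hpdf⟩, hstrip⟩
    rw [← (pdf_strip_iff f s).mp ⟨hpdf, hstrip⟩]
    exact hf

lemma slots_eq_map (files : List String) :
    ((files.zipIdx).foldl pv_groupStep PySem.Dict.empty).items.foldl pv_scatterStep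
        (List.replicate files.length none)
      = files.map (fun f => if pvHtml f && pvHasPdf files (pvStem f) then some (pvStem f) else none) := by
  set G := (files.zipIdx).foldl pv_groupStep PySem.Dict.empty with hGdef
  have hG : ∀ s, G.getD s (false, []) = (pvHasPdf files s, pvPos files s) := by
    intro s
    rw [hGdef, getD_groupFold]
    simp [pvHasPdf, pvPos]
  have hnd : G.keys.Nodup := nodup_keys_groupFold _ _ PySem.Dict.nodup_keys_empty
  have hval : ∀ kv ∈ G.items, kv.2 = (pvHasPdf files kv.1, pvPos files kv.1) := by
    intro kv hkv
    rw [← hG kv.1]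
    exact (PySem.Dict.getD_of_mem_items G (show (kv.1, kv.2) ∈ G.items from hkv) hnd _).symm
  apply List.ext_getElem?
  intro j
  have hlen : (G.items.foldl pv_scatterStep (List.replicate files.length none)).length
      = files.length := by rw [scatter_length, List.length_replicate]
  by_cases hj : j < files.length
  · have hf : files[j]? = some files[j] := List.getElem?_eq_getElem hj
    by_cases hcond : (pvHtml files[j] && pvHasPdf files (pvStem files[j])) = true
    · obtain ⟨hhtml, hhas⟩ := Bool.and_eq_true_iff.mp hcond
      have hjpos : j ∈ pvPos files (pvStem files[j]) :=
        (mem_pvPos files _ j).mpr ⟨files[j], hf, hhtml, rfl⟩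
      have hget : G.get? (pvStem files[j])
          = some (pvHasPdf files (pvStem files[j]), pvPos files (pvStem files[j])) := by
        have := hG (pvStem files[j])
        rw [PySem.Dict.getD_eq_get?_getD] at this
        cases hopt : G.get? (pvStem files[j]) with
        | none =>
          rw [hopt] at this
          simp at this
          rw [this.2] at hjpos
          exact absurd hjpos (List.not_mem_nil)
        | some v => rw [hopt] at this; simp at this; rw [this]
      have hmem : (pvStem files[j], (pvHasPdf files (pvStem files[j]), pvPos files (pvStem files[j]))) ∈ G.items :=
        PySem.Dict.mem_items_of_get?_eq_some _ hget
      obtain ⟨l1, l2, hsplit⟩ := List.append_of_mem hmem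
      have hndl : ¬ (pvStem files[j]) ∈ l2.map (fun p => p.1) := by
        have : G.keys = G.items.map (fun p => p.1) := by simp [PySem.Dict.keys]
        rw [this, hsplit] at hnd
        simp only [List.map_append, List.map_cons, List.nodup_append] at hnd
        have := hnd.2.1
        simp only [List.nodup_cons] at this
        exact this.1
      have hl2 : ∀ kv ∈ l2, ¬(kv.2.1 = true ∧ j ∈ kv.2.2) := by
        rintro kv hkv ⟨hb, hjmem⟩
        have hkv' : kv ∈ G.items := by
          rw [hsplit]; exact List.mem_append_right _ (List.mem_cons_of_mem _ hkv)
        rw [hval kv hkv'] at hjmem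
        obtain ⟨f', hf', _, hstem'⟩ := (mem_pvPos files kv.1 j).mp hjmem
        rw [hf] at hf'
        have hfe : files[j] = f' := Option.some_inj.mp hf'
        have : kv.1 = pvStem files[j] := by rw [← hstem', hfe]
        exact hndl (this ▸ List.mem_map_of_mem hkv)
      rw [hsplit, List.foldl_append, List.foldl_cons]
      rw [scatter_no_match _ _ _ hl2]
      have hstep : pv_scatterStep (l1.foldl pv_scatterStep (List.replicate files.length none))
            (pvStem files[j], (pvHasPdf files (pvStem files[j]), pvPos files (pvStem files[j])))
          = (pvPos files (pvStem files[j])).foldl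
              (fun sl2 i => sl2.set i (some (pvStem files[j])))
              (l1.foldl pv_scatterStep (List.replicate files.length none)) := by
        unfold pv_scatterStep
        rw [if_pos hhas]
      rw [hstep, scatter_inner_mem _ _ _ _ hjpos
        (by rw [scatter_length, List.length_replicate]; exact hj)]
      rw [List.getElem?_map, hf]
      simp only [Option.map_some]
      rw [if_pos hcond]
    · have hnomatch : ∀ kv ∈ G.items, ¬(kv.2.1 = true ∧ j ∈ kv.2.2) := by
        rintro kv hkv ⟨hb, hjmem⟩
        have hb2 : pvHasPdf files kv.1 = true := by
          have hv := hval kv hkv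
          rw [hv] at hb
          simpa using hb
        rw [hval kv hkv] at hjmem
        obtain ⟨f', hf', hhtml', hstem'⟩ := (mem_pvPos files kv.1 j).mp hjmem
        rw [hf] at hf'
        have hfe : f' = files[j] := (Option.some_inj.mp hf').symm
        subst hfe
        apply hcond
        rw [hstem', hhtml']
        simpa using hb2
      rw [scatter_no_match _ _ _ hnomatch, List.getElem?_replicate, if_pos hj,
          List.getElem?_map, hf]
      simp only [Option.map_some]
      rw [if_neg (by simpa using hcond)]
  · have hle : files.length ≤ j := by omega
    rw [List.getElem?_eq_none (by rw [hlen]; exact hle),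
        List.getElem?_eq_none (by simpa using hle)]


-- ===== VERDICT (by name: the statement is the Claim_ definition above) =====
theorem extract_list_of_files_to_analyze_spec : Claim_equal_extract_list_of_files_to_analyze := by
  intro files _
  show extract_list_of_files_to_analyze files =
    (((files.zipIdx).foldl pv_groupStep PySem.Dict.empty).items.foldl pv_scatterStep
      (List.replicate files.length none)).filterMap id
  unfold extract_list_of_files_to_analyze
  refine Eq.trans
    (foldl_if_if (fun file => PySem.Str.endswith file ".html")
      (fun file => files.contains ((((PySem.Str.split? file ".").getD []).headD "") ++ ".pdf"))
      (fun file => ((PySem.Str.split? file ".").getD []).headD "") files []) ?_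
  rw [List.nil_append, slots_eq_map, List.filterMap_map]
  apply List.filterMap_congr
  intro x hx
  rw [contains_eq_hasPdf files (((PySem.Str.split? x ".").getD []).headD "")]
  simp only [Function.comp, pvHtml, pvStem, id]
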